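-- pv_equiv track=rewrite | github.com/jkjale/codingbat-python | Logic-2/lone_sum.py | lone_sum
-- ===== SOURCE A (Python) =====
-- def lone_sum(a, b, c):
--   map1 = {}
--   arr = [a,b,c]
--   ans = 0
--   for num in arr:
--     if num in map1:
--       map1[num] = 2
--     else:
--       map1[num] = 1
--   for key,val in map1.items():
--     if val < 2:
--       ans += key
--   return ans
-- ===== SOURCE B (Python) =====
-- def lone_sum(a, b, c):
--     if a == b:
--         return 0 if b == c else c
--     if a == c:
--         return b
--     if b == c:
--         return a
--     return a + b + c
-- ===== Notes on version B (the rewrite author's own statement) =====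
-- stated objective: simpler
-- what changed: Replaced the dict-counting two-pass loop with a closed-form cascade of pairwise equality tests returning the sum of non-duplicated values directly.
import Mathlib
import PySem

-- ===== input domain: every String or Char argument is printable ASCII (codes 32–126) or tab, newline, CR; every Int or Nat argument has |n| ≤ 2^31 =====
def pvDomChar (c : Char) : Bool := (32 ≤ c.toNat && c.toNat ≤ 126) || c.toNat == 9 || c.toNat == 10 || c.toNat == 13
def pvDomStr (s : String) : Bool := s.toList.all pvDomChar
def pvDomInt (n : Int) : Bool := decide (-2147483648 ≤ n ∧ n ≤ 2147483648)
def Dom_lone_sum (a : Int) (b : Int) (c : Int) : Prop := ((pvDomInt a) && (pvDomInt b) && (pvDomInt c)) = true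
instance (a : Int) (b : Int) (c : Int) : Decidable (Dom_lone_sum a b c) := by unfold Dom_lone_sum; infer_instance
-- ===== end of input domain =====

-- B replaces A's dict-counting loops with a closed-form cascade of pairwise equality tests (objective: simpler).
-- ===== PORT A =====
-- Port of A: build a count dict over [a,b,c], then sum keys with count < 2.
def lone_sum (a : Int) (b : Int) (c : Int) : Int :=
  let map1 : PySem.Dict Int Int := PySem.Dict.empty
  let arr : List Int := [a, b, c]
  let ans : Int := 0
  let map1 := arr.foldl (fun d num =>
    if d.contains num then d.insert num 2 else d.insert num 1) map1
  map1.items.foldl (fun ans kv => if kv.2 < 2 then ans + kv.1 else ans) ans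

-- ===== PORT B =====
-- B: closed-form cascade of pairwise equality tests; no data structure, no loops.
def lone_sum_alt (a : Int) (b : Int) (c : Int) : Int :=
  if a = b then (if b = c then 0 else c)
  else if a = c then b
  else if b = c then a
  else a + b + c

-- ===== PRECONDITION & SPEC =====
def Spec_lone_sum (a : Int) (b : Int) (c : Int) (out : Int) : Prop := out = lone_sum_alt a b c
instance (a : Int) (b : Int) (c : Int) (out : Int) : Decidable (Spec_lone_sum a b c out) := by unfold Spec_lone_sum; infer_instance

-- ===== CLAIM (what is proved, stated in full; the proofs are below) =====
def Claim_equal_lone_sum : Prop := ∀ (a : Int) (b : Int) (c : Int), Dom_lone_sum a b c → Spec_lone_sum a b c (lone_sum a b c)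

-- ===== LEMMAS AND PROOFS =====

-- ===== VERDICT (by name: the statement is the Claim_ definition above) =====
theorem lone_sum_spec : Claim_equal_lone_sum := by
  intro a b c _
  unfold Spec_lone_sum lone_sum lone_sum_alt
  by_cases hab : a = b <;> by_cases hac : a = c <;> by_cases hbc : b = c <;>
    simp [PySem.Dict.empty, PySem.Dict.contains, PySem.Dict.insert,
      hab, hac, hbc, beq_iff_eq, @eq_comm Int]
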